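-- pv_equiv track=rewrite | github.com/Textualization/Wicked21st | python/cascade_instructions.py | simplify_rec
-- ===== SOURCE A (Python) =====
-- def simplify_rec(conds):
--     conds = sorted(conds, key=lambda x: len(x))
--     if conds:
--         cond0 = conds[0]
--
--         rest = list()
--         for cond in conds[1:]:
--             subsumed = True
--             for c in cond0:
--                 if c not in cond:
--                     subsumed = False
--                     break
--             if not subsumed:
--                 rest.append(cond)
--
--             conds = [cond0] + simplify_rec(rest)
--     return conds
-- ===== SOURCE B (Python) =====
-- def simplify_rec(conds):
--     # Iterative: sort once by length, precompute element sets, then repeatedly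
--     # keep the shortest remaining condition and drop everything it subsumes.
--     pending = [(c, set(c)) for c in sorted(conds, key=len)]
--     out = []
--     while pending:
--         head, head_set = pending[0]
--         out.append(head)
--         pending = [(c, s) for c, s in pending[1:] if not head_set <= s]
--     return out
-- ===== Notes on version B (the rewrite author's own statement) =====
-- stated objective: faster
-- what changed: B replaces A's recursive call executed inside every loop iteration (recursion re-sorting and re-filtering on each append) by a single sort, precomputed element sets, and one iterative filtering pass per kept condition.
import Mathlib
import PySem

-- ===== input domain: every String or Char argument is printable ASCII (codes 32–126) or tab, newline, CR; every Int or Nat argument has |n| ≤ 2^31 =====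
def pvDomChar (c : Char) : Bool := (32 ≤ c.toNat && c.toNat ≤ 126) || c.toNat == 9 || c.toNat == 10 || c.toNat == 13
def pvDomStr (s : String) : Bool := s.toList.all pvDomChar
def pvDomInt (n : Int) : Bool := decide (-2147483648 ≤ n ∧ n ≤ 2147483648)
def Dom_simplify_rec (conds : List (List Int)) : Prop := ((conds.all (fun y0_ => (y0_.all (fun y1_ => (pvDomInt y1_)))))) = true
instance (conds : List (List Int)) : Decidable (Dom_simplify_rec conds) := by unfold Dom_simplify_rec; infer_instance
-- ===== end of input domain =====

-- B is an iterative rewrite of A (sort once, one filtering pass per kept condition,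
-- set-based subset tests) replacing A's recursive call inside the loop; return value only.

-- ===== PORT A =====
-- inner loop 'for c in cond0: if c not in cond: subsumed = False; break'
def srCheck (cond0 cond : List Int) : Bool :=
  match cond0 with
  | [] => true
  | c :: cs => if ¬ cond.contains c then false else srCheck cs cond

mutual
-- the 'for cond in conds[1:]' loop; 'acc' is the current value of the variable 'conds'
def srLoop (cond0 : List Int) (todo rest acc : List (List Int)) : List (List Int) :=
  match todo with
  | [] => acc
  | cond :: todo' =>
      let rest' := if ¬ srCheck cond0 cond then rest ++ [cond] else rest
      srLoop cond0 todo' rest' ([cond0] ++ simplify_rec rest')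
termination_by (rest.length + todo.length + 1, todo.length)
decreasing_by
  · apply Prod.Lex.left
    split <;> simp only [List.length_append, List.length_cons, List.length_nil] <;> omega
  · split
    · have heq : (rest ++ [cond]).length + todo'.length + 1 = rest.length + (cond :: todo').length + 1 := by
        simp only [List.length_append, List.length_cons, List.length_nil]; omega
      rw [heq]
      exact Prod.Lex.right _ (by simp)
    · apply Prod.Lex.left
      simp only [List.length_cons]; omega

def simplify_rec (conds : List (List Int)) : List (List Int) :=
  let s := PySem.List.sorted conds (fun x => x.length)
  match hs : s with
  | [] => s
  | cond0 :: tail => srLoop cond0 tail [] s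
termination_by (conds.length, conds.length)
decreasing_by
  have hl : (PySem.List.sorted conds (fun x : List Int => x.length)).length = conds.length :=
    PySem.List.length_sorted ..
  have hc := congrArg List.length hs
  rw [hl] at hc
  simp only [List.length_cons] at hc
  apply Prod.Lex.right'
  · simp only [List.length_nil]; omega
  · omega
end

-- ===== PORT B =====
-- the 'while pending' loop of B
def altLoop (pending : List (List Int × PySem.Set Int)) (out : List (List Int)) :
    List (List Int) :=
  match pending with
  | [] => out
  | (head, headSet) :: tail =>
      altLoop (tail.filter (fun cs => ¬ PySem.Set.issubset headSet cs.2)) (out ++ [head])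
termination_by pending.length
decreasing_by
  refine Nat.lt_succ_of_le ?_
  have h1 := List.length_filter_le (fun x : {x // x ∈ tail} => decide (¬ PySem.Set.issubset headSet x.val.2 = true)) tail.attach
  simpa using h1

def simplify_rec_alt (conds : List (List Int)) : List (List Int) :=
  altLoop ((PySem.List.sorted conds (fun x => x.length)).map
    (fun c => (c, PySem.Set.ofList c))) []

-- ===== PRECONDITION & SPEC =====
def Spec_simplify_rec (conds : List (List Int)) (out : List (List Int)) : Prop := out = simplify_rec_alt conds
instance (conds : List (List Int)) (out : List (List Int)) : Decidable (Spec_simplify_rec conds out) := by unfold Spec_simplify_rec; infer_instance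

-- ===== CLAIM (what is proved, stated in full; the proofs are below) =====
def Claim_equal_simplify_rec : Prop := ∀ (conds : List (List Int)), Dom_simplify_rec conds → Spec_simplify_rec conds (simplify_rec conds)

-- ===== LEMMAS AND PROOFS =====

-- the common skeleton: keep the head, filter out what it subsumes, repeat
def core (l : List (List Int)) : List (List Int) :=
  match l with
  | [] => []
  | c0 :: tail => c0 :: core (tail.filter (fun c => ¬ srCheck c0 c))
termination_by l.length
decreasing_by
  refine Nat.lt_succ_of_le ?_
  have h1 := List.length_filter_le (fun x : {x // x ∈ tail} => decide (¬ srCheck c0 x.val = true)) tail.attach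
  simpa using h1

theorem srCheck_iff (cond0 cond : List Int) :
    srCheck cond0 cond = true ↔ ∀ x ∈ cond0, x ∈ cond := by
  induction cond0 with
  | nil => simp [srCheck]
  | cons c cs ih =>
    simp only [srCheck]
    split <;> rename_i h <;> simp_all

theorem issubset_eq_srCheck (c0 c : List Int) :
    PySem.Set.issubset (PySem.Set.ofList c0) (PySem.Set.ofList c) = srCheck c0 c := by
  rw [Bool.eq_iff_iff, srCheck_iff]
  simp only [PySem.Set.issubset, List.all_eq_true, PySem.Set.contains_iff]
  constructor
  · intro h x hx
    exact (PySem.Set.mem_ofList c x).1 (h x ((PySem.Set.mem_ofList c0 x).2 hx))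
  · intro h x hx
    exact (PySem.Set.mem_ofList c x).2 (h x ((PySem.Set.mem_ofList c0 x).1 hx))

theorem srLoop_char (cond0 : List Int) (todo rest acc : List (List Int)) :
    srLoop cond0 todo rest acc =
      if todo = [] then acc
      else [cond0] ++ simplify_rec (rest ++ todo.filter (fun c => ¬ srCheck cond0 c)) := by
  induction todo generalizing rest acc with
  | nil => rw [srLoop]; simp
  | cons cond todo' ih =>
    rw [srLoop, ih]
    by_cases hch : srCheck cond0 cond = true <;>
      by_cases hnil : todo' = [] <;>
        simp [hch, hnil, List.append_assoc]

theorem simplify_rec_eq_core (conds : List (List Int)) :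
    simplify_rec conds = core (PySem.List.sorted conds (fun x => x.length)) := by
  generalize hn : conds.length = n
  induction n using Nat.strong_induction_on generalizing conds with
  | _ n ih =>
  rw [simplify_rec.eq_def]
  cases hs : PySem.List.sorted conds (fun x : List Int => x.length) with
  | nil => simp [core]
  | cons c0 tail =>
    simp only
    rw [srLoop_char]
    by_cases htail : tail = []
    · subst htail
      simp only [core]
      rw [simplify_rec.eq_def]
      simp
      rw [core]
    · rw [if_neg htail, core]
      simp only [List.nil_append]
      have hsorted : PySem.List.sorted (tail.filter (fun c => ¬ srCheck c0 c))
          (fun x : List Int => x.length) = tail.filter (fun c => ¬ srCheck c0 c) := by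
        apply PySem.List.sorted_eq_self_of_pairwise
        have hp := PySem.List.sorted_pairwise conds (fun x : List Int => x.length)
        rw [hs] at hp
        exact (List.Pairwise.sublist List.filter_sublist hp.of_cons)
      have hlen : (tail.filter (fun c => ¬ srCheck c0 c)).length < n := by
        have h1 := congrArg List.length hs
        rw [PySem.List.length_sorted, hn] at h1
        have := List.length_filter_le (fun c => ¬ srCheck c0 c) tail
        simp at h1
        omega
      rw [ih _ hlen _ rfl, hsorted]
      rfl

theorem altLoop_char (l : List (List Int)) (out : List (List Int)) :
    altLoop (l.map (fun c => (c, PySem.Set.ofList c))) out = out ++ core l := by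
  generalize hn : l.length = n
  induction n using Nat.strong_induction_on generalizing l out with
  | _ n ih =>
  cases l with
  | nil =>
    rw [altLoop.eq_def, core]
    simp
  | cons h t =>
    rw [List.map_cons, altLoop.eq_def]
    simp only [List.filter_map, core]
    have hpred : ((fun cs : List Int × PySem.Set Int =>
          decide (¬ PySem.Set.issubset (PySem.Set.ofList h) cs.2 = true)) ∘
          (fun c : List Int => (c, PySem.Set.ofList c)))
        = (fun c : List Int => decide (¬ srCheck h c = true)) := by
      funext c
      simp only [Function.comp_apply]
      rw [issubset_eq_srCheck]
    rw [hpred]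
    have hlen : (t.filter (fun c => ¬ srCheck h c)).length < n := by
      have := List.length_filter_le (fun c => ¬ srCheck h c) t
      simp only [List.length_cons] at hn
      omega
    rw [ih _ hlen _ _ rfl]
    simp

-- ===== VERDICT (by name: the statement is the Claim_ definition above) =====
theorem simplify_rec_spec : Claim_equal_simplify_rec := by
  intro conds _
  unfold Spec_simplify_rec simplify_rec_alt
  rw [simplify_rec_eq_core, altLoop_char]
  simp
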